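-- pv_equiv track=rewrite | github.com/QANOT/qanot | qanot/tools/web.py | _is_blocked_hostname
-- ===== SOURCE A (Python) =====
-- _BLOCKED_HOSTNAMES = frozenset({
--     "localhost",
--     "localhost.localdomain",
--     "metadata.google.internal",
--     "metadata.google.internal.",
--     "metadata",  # short form sometimes resolved on cloud VMs
-- })
--
-- _BLOCKED_HOSTNAME_SUFFIXES = (
--     ".localhost", ".local", ".internal", ".lan", ".intranet", ".corp", ".home",
-- )
--
-- def _is_blocked_hostname(hostname: str) -> bool:
--     """Match hostname against literal blocklist + suffix patterns."""
--     h = hostname.lower().rstrip(".")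
--     if not h:
--         return True
--     if h in _BLOCKED_HOSTNAMES:
--         return True
--     for suffix in _BLOCKED_HOSTNAME_SUFFIXES:
--         if h.endswith(suffix):
--             return True
--     return False
-- ===== SOURCE B (Python) =====
-- _BLOCKED_LABELS = frozenset({
--     "localhost", "local", "internal", "lan", "intranet", "corp", "home",
-- })
--
-- def _is_blocked_hostname(hostname: str) -> bool:
--     """Branch on the last dot: classify the final label, else the whole name."""
--     h = hostname.lower().rstrip(".")
--     head, sep, last = h.rpartition(".")
--     if not sep:
--         return h in ("", "localhost", "metadata")
--     return last in _BLOCKED_LABELS or (head, last) == ("localhost", "localdomain")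
-- ===== Notes on version B (the rewrite author's own statement) =====
-- stated objective: simpler
-- what changed: Replaces the frozenset-of-hostnames membership plus a seven-suffix endswith loop by one rpartition on the last dot followed by a two-way branch: no dot means the whole name is checked against three literals, a dot means the final label is looked up in a label set (with localhost.localdomain as the one full-name special case).
import Mathlib
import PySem

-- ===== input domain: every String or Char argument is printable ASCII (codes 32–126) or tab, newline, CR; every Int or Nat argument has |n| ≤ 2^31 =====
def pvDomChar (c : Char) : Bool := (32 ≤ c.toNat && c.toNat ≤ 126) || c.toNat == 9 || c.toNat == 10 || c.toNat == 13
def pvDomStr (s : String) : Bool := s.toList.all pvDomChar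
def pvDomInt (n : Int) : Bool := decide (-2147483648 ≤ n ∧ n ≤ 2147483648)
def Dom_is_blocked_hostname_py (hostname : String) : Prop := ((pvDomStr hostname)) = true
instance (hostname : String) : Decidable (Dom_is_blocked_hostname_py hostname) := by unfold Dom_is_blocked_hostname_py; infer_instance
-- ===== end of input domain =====

set_option maxRecDepth 8192

-- B replaces A's blocklist membership + endswith loop over seven dot-suffixes by
-- one rpartition on the last dot and a per-branch check (exact because each
-- blocked suffix is one dot plus one label); objective: simpler.


-- ===== PORT A =====
def pvBlockedHostnames : List (List Char) :=
  ["localhost".toList, "localhost.localdomain".toList,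
   "metadata.google.internal".toList, "metadata.google.internal.".toList,
   "metadata".toList]

def pvBlockedSuffixes : List (List Char) :=
  [".localhost".toList, ".local".toList, ".internal".toList, ".lan".toList,
   ".intranet".toList, ".corp".toList, ".home".toList]

-- hostname.lower().rstrip("."): rstrip with a chars argument ported by hand
-- (drop trailing '.' characters); exact.
def pvRstripDots (l : List Char) : List Char :=
  (l.reverse.dropWhile (fun c => c == '.')).reverse

def is_blocked_hostname_py (hostname : String) : Bool :=
  let h := pvRstripDots (PySem.Chars.lower hostname.toList)
  if h.isEmpty then true
  else if pvBlockedHostnames.contains h then true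
  else pvBlockedSuffixes.any (fun s => PySem.Chars.endswith h s)

-- ===== PORT B =====
def pvBlockedLabels : List (List Char) :=
  ["localhost".toList, "local".toList, "internal".toList, "lan".toList,
   "intranet".toList, "corp".toList, "home".toList]

-- h.rpartition("."): head / last around the LAST dot, ported by hand via the
-- reversed list (takeWhile = chars after the last dot, dropWhile.tail = chars
-- before it); sep is nonempty exactly when '.' occurs in h; exact.
def is_blocked_hostname_py_alt (hostname : String) : Bool :=
  let h := pvRstripDots (PySem.Chars.lower hostname.toList)
  let last := (h.reverse.takeWhile (fun c => c != '.')).reverse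
  let head := (h.reverse.dropWhile (fun c => c != '.')).tail.reverse
  if !(h.contains '.') then
    h == ([] : List Char) || h == "localhost".toList || h == "metadata".toList
  else
    pvBlockedLabels.contains last ||
      (head == "localhost".toList && last == "localdomain".toList)

-- ===== PRECONDITION & SPEC =====
def Spec_is_blocked_hostname_py (hostname : String) (out : Bool) : Prop := out = is_blocked_hostname_py_alt hostname
instance (hostname : String) (out : Bool) : Decidable (Spec_is_blocked_hostname_py hostname out) := by unfold Spec_is_blocked_hostname_py; infer_instance

-- ===== CLAIM (what is proved, stated in full; the proofs are below) =====
def Claim_equal_is_blocked_hostname_py : Prop := ∀ (hostname : String), Dom_is_blocked_hostname_py hostname → Spec_is_blocked_hostname_py hostname (is_blocked_hostname_py hostname)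

-- ===== LEMMAS AND PROOFS =====

-- If p contains no dot, then r starts with p followed by a dot iff r contains a
-- dot and its maximal dot-free prefix is exactly p.
lemma prefix_dot_takeWhile (p r : List Char) (hp : ∀ c ∈ p, c ≠ '.') :
    (p ++ ['.']) <+: r ↔ ('.' ∈ r ∧ r.takeWhile (fun c => c != '.') = p) := by
  induction p generalizing r with
  | nil =>
    cases r with
    | nil => simp
    | cons c rs =>
      by_cases hc : c = '.'
      · subst hc
        simp [List.cons_prefix_cons]
      · have hc' : ¬ ('.' = c) := fun h => hc h.symm
        simp [List.cons_prefix_cons, hc, hc']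
  | cons a p ih =>
    have ha : a ≠ '.' := hp a (by simp)
    cases r with
    | nil => simp
    | cons c rs =>
      by_cases hc : c = a
      · subst hc
        simp only [List.cons_append, List.cons_prefix_cons, true_and,
          List.takeWhile_cons, List.mem_cons]
        rw [ih rs (fun x hx => hp x (by simp [hx]))]
        simp [ha]
        intro _ hdc
        exact absurd hdc.symm ha
      · constructor
        · intro hpre
          rw [List.cons_append, List.cons_prefix_cons] at hpre
          exact absurd hpre.1.symm hc
        · rintro ⟨-, ht⟩
          by_cases hcd : c = '.'
          · simp [hcd] at ht
          · simp only [List.takeWhile_cons, bne_iff_ne, ne_eq, hcd,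
              not_false_eq_true, if_pos] at ht
            rw [List.cons.injEq] at ht
            exact absurd ht.1 hc

-- endswith against a one-dot-one-label suffix, read off the reversed host.
lemma endswith_dot_label (h lab : List Char) (hl : ∀ c ∈ lab, c ≠ '.') :
    PySem.Chars.endswith h ('.' :: lab) = true ↔
      ('.' ∈ h ∧ h.reverse.takeWhile (fun c => c != '.') = lab.reverse) := by
  rw [PySem.Chars.endswith_iff, ← List.reverse_prefix, List.reverse_cons,
    prefix_dot_takeWhile _ _ (fun c hc => hl c (List.mem_reverse.mp hc)),
    List.mem_reverse]

-- The suffix loop of A equals the last-label lookup, for every host string.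
lemma last_branch (h : List Char) :
    pvBlockedSuffixes.any (fun s => PySem.Chars.endswith h s)
      = (h.contains '.' && pvBlockedLabels.contains
          ((h.reverse.takeWhile (fun c => c != '.')).reverse)) := by
  have e1 : ".localhost".toList = '.' :: "localhost".toList := by decide
  have e2 : ".local".toList = '.' :: "local".toList := by decide
  have e3 : ".internal".toList = '.' :: "internal".toList := by decide
  have e4 : ".lan".toList = '.' :: "lan".toList := by decide
  have e5 : ".intranet".toList = '.' :: "intranet".toList := by decide
  have e6 : ".corp".toList = '.' :: "corp".toList := by decide
  have e7 : ".home".toList = '.' :: "home".toList := by decide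
  rw [Bool.eq_iff_iff]
  simp only [pvBlockedSuffixes, pvBlockedLabels, List.any_cons, List.any_nil,
    Bool.or_eq_true, Bool.and_eq_true, e1, e2, e3, e4, e5, e6, e7,
    Bool.or_false,
    List.contains_eq_mem, decide_eq_true_eq, List.mem_cons,
    List.not_mem_nil, or_false, List.reverse_eq_iff]
  rw [endswith_dot_label h "localhost".toList (by simp),
    endswith_dot_label h "local".toList (by simp),
    endswith_dot_label h "internal".toList (by simp),
    endswith_dot_label h "lan".toList (by simp),
    endswith_dot_label h "intranet".toList (by simp),
    endswith_dot_label h "corp".toList (by simp),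
    endswith_dot_label h "home".toList (by simp)]
  simp only [and_or_left]

-- first element surviving dropWhile fails the predicate
lemma pv_head_dropWhile {a : Type} (p : a -> Bool) :
    forall (l : List a) (c : a) (t : List a), l.dropWhile p = c :: t -> p c = false := by
  intro l
  induction l with
  | nil => intro c t h; simp at h
  | cons x l ih =>
    intro c t h
    rw [List.dropWhile_cons] at h
    by_cases hpx : p x = true
    · rw [if_pos hpx] at h
      exact ih c t h
    · rw [if_neg hpx] at h
      rw [List.cons.injEq] at h
      rw [← h.1]
      simpa using hpx

-- rpartition decomposition: when h contains a dot, h = head ++ '.' :: last.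
lemma rpartition_decomp (h : List Char) (hd : '.' ∈ h) :
    (h.reverse.dropWhile (fun c => c != '.')).tail.reverse ++
      '.' :: (h.reverse.takeWhile (fun c => c != '.')).reverse = h := by
  have hmem : '.' ∈ h.reverse := List.mem_reverse.mpr hd
  have hdrop : h.reverse.dropWhile (fun c => c != '.') ≠ [] := by
    intro hnil
    have htd := List.takeWhile_append_dropWhile (p := fun c => c != '.') (l := h.reverse)
    rw [hnil, List.append_nil] at htd
    rw [<- htd] at hmem
    have := List.mem_takeWhile_imp hmem
    simp at this
  obtain ⟨c, t, hct⟩ := List.exists_cons_of_ne_nil hdrop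
  have hc : c = '.' := by
    have := pv_head_dropWhile _ _ _ _ hct
    simpa using this
  conv_rhs => rw [<- List.reverse_reverse h,
    <- List.takeWhile_append_dropWhile (p := fun c => c != '.') (l := h.reverse)]
  rw [hct, hc]
  simp

-- the normalized host never ends in a dot
lemma rstrip_no_dot_end (l : List Char) :
    (pvRstripDots l).reverse.head? ≠ some '.' := by
  unfold pvRstripDots
  rw [List.reverse_reverse]
  intro hh
  rcases hds : l.reverse.dropWhile (fun c => c == '.') with _ | ⟨c, t⟩
  · rw [hds] at hh; simp at hh
  · have hpc := pv_head_dropWhile _ _ _ _ hds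
    rw [hds] at hh
    simp at hh
    rw [hh] at hpc
    simp at hpc

-- core equivalence for any already-normalized host (no trailing dot)
lemma core_eq (h : List Char) (hnd : h.reverse.head? ≠ some '.') :
    (if h.isEmpty then true
     else if pvBlockedHostnames.contains h then true
     else pvBlockedSuffixes.any (fun s => PySem.Chars.endswith h s))
    = (if !(h.contains '.') then
         h == ([] : List Char) || h == "localhost".toList || h == "metadata".toList
       else
         pvBlockedLabels.contains ((h.reverse.takeWhile (fun c => c != '.')).reverse) ||
           ((h.reverse.dropWhile (fun c => c != '.')).tail.reverse == "localhost".toList &&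
            (h.reverse.takeWhile (fun c => c != '.')).reverse == "localdomain".toList)) := by
  by_cases hd : '.' ∈ h
  · -- a dot is present: h is nonempty
    have hcont : h.contains '.' = true := by simpa [List.contains_eq_mem] using hd
    have hne : h ≠ [] := by rintro rfl; simp at hd
    rw [last_branch]
    have hie : h.isEmpty = false := by simp [hne]
    simp only [hcont, hie, Bool.not_true, Bool.false_eq_true, if_false, Bool.true_and]
    -- case on full-blocklist membership
    by_cases hbl : h = "localhost.localdomain".toList
    · subst hbl; decide
    by_cases hbm : h = "metadata.google.internal".toList
    · subst hbm; decide
    have hbm' : h ≠ "metadata.google.internal.".toList := by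
      rintro rfl; exact hnd (by decide)
    have hb1 : h ≠ "localhost".toList := by
      rintro rfl; revert hd; decide
    have hb2 : h ≠ "metadata".toList := by
      rintro rfl; revert hd; decide
    have hbh : pvBlockedHostnames.contains h = false := by
      simp only [pvBlockedHostnames, List.contains_eq_mem, List.mem_cons,
        List.not_mem_nil, or_false, decide_eq_false_iff_not]
      push Not
      exact ⟨hb1, hbl, hbm, hbm', hb2⟩
    rw [hbh]
    simp only [Bool.false_eq_true, if_false]
    -- remaining: label lookup = label lookup || (head,last) = (localhost, localdomain)
    have hpair : ¬ ((h.reverse.dropWhile (fun c => c != '.')).tail.reverse = "localhost".toList ∧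
        (h.reverse.takeWhile (fun c => c != '.')).reverse = "localdomain".toList) := by
      rintro ⟨h1, h2⟩
      apply hbl
      rw [← rpartition_decomp h hd, h1, h2]
      decide
    rw [Bool.eq_iff_iff]
    simp only [Bool.or_eq_true, Bool.and_eq_true, beq_iff_eq]
    constructor
    · exact Or.inl
    · rintro (hx | hx)
      · exact hx
      · exact absurd hx hpair
  · -- no dot: the suffix loop is dead and only dot-free blocklist entries can match
    have hcont : h.contains '.' = false := by
      simpa [List.contains_eq_mem] using hd
    rw [last_branch, hcont]
    simp only [Bool.false_and, Bool.not_false, if_true]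
    by_cases hne : h = []
    · subst hne; decide
    have hie : h.isEmpty = false := by simp [hne]
    have hbl : h ≠ "localhost.localdomain".toList := by
      rintro rfl; exact hd (by decide)
    have hbm : h ≠ "metadata.google.internal".toList := by
      rintro rfl; exact hd (by decide)
    have hbm' : h ≠ "metadata.google.internal.".toList := by
      rintro rfl; exact hd (by decide)
    have hbh : pvBlockedHostnames.contains h
        = (h == "localhost".toList || h == "metadata".toList) := by
      rw [Bool.eq_iff_iff]
      simp only [pvBlockedHostnames, List.contains_eq_mem, List.mem_cons,
        List.not_mem_nil, or_false, decide_eq_true_eq, Bool.or_eq_true, beq_iff_eq]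
      constructor
      · rintro (h1 | h1 | h1 | h1 | h1)
        · exact Or.inl h1
        · exact absurd h1 hbl
        · exact absurd h1 hbm
        · exact absurd h1 hbm'
        · exact Or.inr h1
      · rintro (h1 | h1) <;> simp [h1]
    have hne' : (h == ([] : List Char)) = false := by simp [hne]
    rw [hie, hbh, hne']
    simp only [Bool.false_eq_true, if_false, Bool.false_or]
    cases hab : (h == "localhost".toList || h == "metadata".toList) <;> rfl

-- ===== VERDICT (by name: the statement is the Claim_ definition above) =====
theorem is_blocked_hostname_py_spec : Claim_equal_is_blocked_hostname_py := by
  intro hostname _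
  unfold Spec_is_blocked_hostname_py is_blocked_hostname_py is_blocked_hostname_py_alt
  exact core_eq _ (rstrip_no_dot_end _)
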